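-- pv_equiv track=rewrite | github.com/debdattasarkar/DSA | 2. GFG/5. Top 50 Graph Problems/2. (M) Construct binary palindrome by repeated appending and trimming/py_sol.py | binaryPalindrome
-- ===== SOURCE A (Python) =====
-- def binaryPalindrome(n : int, k : int) -> str:
--     # code here
--     # We want a k-periodic palindrome S of length n, with as many zeros as possible,
--     # and the k-length block starts with '1' (i.e., residue 0 is '1').
--     #
--     # Let p = (n - 1) % k. By palindromic constraints, residue 0 is paired with residue p,
--     # so both must be equal; since the block must start with '1', we set residues {0, p} to '1'
--     # and all other residues to '0' to maximize zeros.
--     #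
--     # Thus, for every position i, S[i] = '1' iff i % k in {0, p}; otherwise '0'.
--
--     if n <= 0 or k <= 0:
--         return "-1"
--
--     p = (n - 1) % k
--
--     # Build answer directly in O(n), O(1) extra space (aside from output).
--     res_chars = []
--     for i in range(n):
--         r = i % k
--         res_chars.append('1' if r == 0 or r == p else '0')
--
--     return ''.join(res_chars)
-- ===== SOURCE B (Python) =====
-- def binaryPalindrome(n: int, k: int) -> str:
--     if n <= 0 or k <= 0:
--         return "-1"
--     p = (n - 1) % k
--     m = min(n, k)          # never build a block longer than the answer
--     block = ['0'] * m
--     block[0] = '1'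
--     block[p] = '1'
--     tile = ''.join(block)
--     return (tile * (n // k + 1))[:n]
-- ===== Notes on version B (the rewrite author's own statement) =====
-- stated objective: faster
-- what changed: Instead of looping over all n positions computing i % k each time, B builds the length-k period once and produces the answer by string repetition plus a slice to length n.
import Mathlib
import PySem

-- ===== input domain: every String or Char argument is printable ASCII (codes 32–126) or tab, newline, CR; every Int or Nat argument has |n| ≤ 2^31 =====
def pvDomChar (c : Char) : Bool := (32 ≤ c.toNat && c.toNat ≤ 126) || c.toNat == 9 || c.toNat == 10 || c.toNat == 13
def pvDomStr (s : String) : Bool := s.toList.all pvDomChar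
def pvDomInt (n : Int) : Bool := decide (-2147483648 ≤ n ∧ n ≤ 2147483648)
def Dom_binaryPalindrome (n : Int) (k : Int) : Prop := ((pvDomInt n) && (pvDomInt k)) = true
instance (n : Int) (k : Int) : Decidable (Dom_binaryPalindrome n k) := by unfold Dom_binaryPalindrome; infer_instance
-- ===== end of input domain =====

-- B builds the length-k period once, then tiles it by string repetition and slices to length n
-- (objective: faster at the Python level; A loops over all n positions computing i % k each time).


-- ===== PORT A =====
def binaryPalindrome (n : Int) (k : Int) : String :=
  if n ≤ 0 ∨ k ≤ 0 then "-1"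
  else
    let p := PySem.Int.mod (n - 1) k
    let resChars := (PySem.List.pyRange 0 n 1).foldl
      (fun acc i =>
        let r := PySem.Int.mod i k
        acc ++ [if r = 0 ∨ r = p then '1' else '0']) ([] : List Char)
    String.ofList resChars

-- ===== PORT B =====
def binaryPalindrome_alt (n : Int) (k : Int) : String :=
  if n ≤ 0 ∨ k ≤ 0 then "-1"
  else
    let p := PySem.Int.mod (n - 1) k
    -- m = min(n, k) ; block = ['0'] * m ; block[0] = '1' ; block[p] = '1'   (0 ≤ p < m here)
    let block := ((List.replicate (min n k).toNat '0').set 0 '1').set p.toNat '1'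
    -- (tile * (n // k + 1))[:n]
    let tiled := (List.replicate (PySem.Int.floordiv n k + 1).toNat block).flatten
    String.ofList (PySem.List.slice tiled none (some n))

-- ===== PRECONDITION & SPEC =====
def Spec_binaryPalindrome (n : Int) (k : Int) (out : String) : Prop := out = binaryPalindrome_alt n k
instance (n : Int) (k : Int) (out : String) : Decidable (Spec_binaryPalindrome n k out) := by unfold Spec_binaryPalindrome; infer_instance

-- ===== CLAIM (what is proved, stated in full; the proofs are below) =====
def Claim_equal_binaryPalindrome : Prop := ∀ (n : Int) (k : Int), Dom_binaryPalindrome n k → Spec_binaryPalindrome n k (binaryPalindrome n k)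

-- ===== LEMMAS AND PROOFS =====

-- A's loop: appending one mapped element per iteration is List.map.
theorem pv_foldl_append_map {α β : Type} (g : α → β) :
    ∀ (l : List α) (acc : List β),
      l.foldl (fun acc i => acc ++ [g i]) acc = acc ++ l.map g := by
  intro l
  induction l with
  | nil => simp
  | cons x xs ih => intro acc; simp [List.foldl, ih]

-- Element i of m copies of b concatenated is b[i % b.length].
theorem pv_getElem_flatten_replicate {α : Type} (b : List α) (hb : 0 < b.length) :
    ∀ (m i : Nat) (h : i < ((List.replicate m b).flatten).length),
      ((List.replicate m b).flatten)[i]'h = b[i % b.length]'(Nat.mod_lt i hb) := by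
  intro m
  induction m with
  | zero => intro i h; simp at h
  | succ m ih =>
      intro i h
      simp only [List.replicate_succ, List.flatten_cons]
      by_cases hi : i < b.length
      · rw [List.getElem_append_left hi]
        congr 1
        exact (Nat.mod_eq_of_lt hi).symm
      · push_neg at hi
        have h' : i - b.length < ((List.replicate m b).flatten).length := by
          simp only [List.replicate_succ, List.flatten_cons, List.length_append] at h
          omega
        rw [List.getElem_append_right hi]
        rw [ih (i - b.length) h']
        congr 1
        conv_rhs => rw [show i = (i - b.length) + b.length by omega]
        rw [Nat.add_mod_right]

-- The block's r-th character is '1' exactly at indices 0 and P.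
theorem pv_getElem_block (L P r : Nat) (_hP : P < L) (_hr : r < L)
    (h : r < (((List.replicate L '0').set 0 '1').set P '1').length) :
    (((List.replicate L '0').set 0 '1').set P '1')[r]'h
      = if r = 0 ∨ r = P then '1' else '0' := by
  rw [List.getElem_set, List.getElem_set]
  simp only [List.getElem_replicate]
  split_ifs with h1 h2 h3 h4 h5 <;> simp_all <;> omega

theorem binaryPalindrome_eq_alt (n k : Int) : binaryPalindrome n k = binaryPalindrome_alt n k := by
  unfold binaryPalindrome binaryPalindrome_alt
  by_cases hg : n ≤ 0 ∨ k ≤ 0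
  · simp [hg]
  · simp only [hg, if_false]
    push_neg at hg
    obtain ⟨hn, hk⟩ := hg
    -- names
    set N := n.toNat with hN
    set K := k.toNat with hK
    have hnN : n = (N : Int) := by omega
    have hkK : k = (K : Int) := by omega
    have hK0 : 0 < K := by omega
    set P := (N - 1) % K with hP
    have hPK : P < K := Nat.mod_lt _ hK0
    -- p = ↑P
    have hp : PySem.Int.mod (n - 1) k = (P : Int) := by
      rw [hnN, hkK, show ((N : Int) - 1) = ((N - 1 : Nat) : Int) by omega]
      exact_mod_cast PySem.Int.mod_natCast (N - 1) K
    -- floordiv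
    have hfd : PySem.Int.floordiv n k = ((N / K : Nat) : Int) := by
      rw [hnN, hkK]; exact_mod_cast PySem.Int.floordiv_natCast N K
    simp only [hp, hfd]
    congr 1
    -- A side is a map
    rw [pv_foldl_append_map, List.nil_append, hnN, PySem.List.pyRange_zero_natCast]
    rw [List.map_map]
    -- B side: slice is take
    rw [PySem.List.slice_to_natCast]
    have hM : (((N / K : Nat) : Int) + 1).toNat = N / K + 1 := by
      rw [show ((N / K : Nat) : Int) + 1 = ((N / K + 1 : Nat) : Int) by push_cast; ring,
        Int.toNat_natCast]
    rw [hM, Int.toNat_natCast]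
    -- block facts
    have hmnk : (min ((N : Int)) k).toNat = min N K := by omega
    rw [hmnk]
    set L := min N K with hL
    have hL0 : 0 < L := by omega
    have hPL : P < L := by
      rcases le_total K N with h | h
      · rw [hL, min_eq_right h]; exact hPK
      · rw [hL, min_eq_left h, hP, Nat.mod_eq_of_lt (by omega)]; omega
    set block := ((List.replicate L '0').set 0 '1').set P '1' with hblock
    have hblen : block.length = L := by simp [hblock]
    have hblen0 : 0 < block.length := by omega
    have hflen : ((List.replicate (N / K + 1) block).flatten).length = (N / K + 1) * L := by
      simp [hblen, Nat.mul_comm]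
    have hNle : N ≤ (N / K + 1) * L := by
      rcases le_total K N with h | h
      · rw [hL, min_eq_right h]
        exact le_of_lt ((Nat.div_lt_iff_lt_mul hK0).mp (Nat.lt_succ_self _))
      · rw [hL, min_eq_left h]
        exact Nat.le_mul_of_pos_left N (Nat.succ_pos _)
    apply List.ext_getElem
    · simp [hflen]; omega
    · intro i h1 h2
      have hiN : i < N := by simpa using h1
      have hfi : i < ((List.replicate (N / K + 1) block).flatten).length :=
        lt_of_lt_of_le hiN (le_trans hNle (le_of_eq hflen.symm))
      rw [List.getElem_take, pv_getElem_flatten_replicate block hblen0 _ i hfi]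
      simp only [List.getElem_map, List.getElem_range, Function.comp_apply]
      have hmodint : PySem.Int.mod ((i : Int)) k = ((i % K : Nat) : Int) := by
        rw [hkK]; exact_mod_cast PySem.Int.mod_natCast i K
      have hget := pv_getElem_block L P (i % block.length) hPL
        (by simpa [hblen] using Nat.mod_lt i hL0) (Nat.mod_lt i hblen0)
      have hmm : i % block.length = i % K := by
        rw [hblen, hL]
        rcases le_total K N with h | h
        · rw [min_eq_right h]
        · rw [min_eq_left h, Nat.mod_eq_of_lt hiN, Nat.mod_eq_of_lt (by omega)]
      have hcond : (((i % K : Nat) : Int) = 0 ∨ ((i % K : Nat) : Int) = (P : Int)) ↔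
          (i % K = 0 ∨ i % K = P) := by omega
      rw [hmodint, hget, hmm]
      simp only [hcond]

-- ===== VERDICT (by name: the statement is the Claim_ definition above) =====
theorem binaryPalindrome_spec : Claim_equal_binaryPalindrome := by
  intro n k _
  unfold Spec_binaryPalindrome
  exact binaryPalindrome_eq_alt n k
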